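-- pv_equiv track=rewrite | github.com/Clopez527Launcher/reflexx-email-fetcher | callmetrics/fetch_email_reports.py | parse_agency_code_from_filename
-- ===== SOURCE A (Python) =====
-- def parse_agency_code_from_filename(filename: str) -> str:
--     """
--     Extract agency code from filenames like:
--       - Daily_Report_A0D6225.xlsx
--       - Daily_Report_A0D6225 (1).xlsx
--       - Daily_Report_A0D6225_Users.xlsx
--       - Daily_Report_A0D6225 - Something.xlsx
--
--     Strategy:
--       take text after "Daily_Report_" until first "_" or " " or "."
--     """
--     if not filename or "Daily_Report_" not in filename:
--         return ""
--
--     after = filename.split("Daily_Report_", 1)[1]  # everything after prefix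
--     # stop at common separators
--     for sep in ["_", " ", "."]:
--         if sep in after:
--             after = after.split(sep, 1)[0]
--     return after.strip()
-- ===== SOURCE B (Python) =====
-- def parse_agency_code_from_filename(filename: str) -> str:
--     if not filename or "Daily_Report_" not in filename:
--         return ""
--     after = filename.split("Daily_Report_", 1)[1]
--     code_chars = []
--     for ch in after:
--         if ch in ("_", " ", "."):
--             break
--         code_chars.append(ch)
--     return "".join(code_chars).strip()
-- ===== Notes on version B (the rewrite author's own statement) =====
-- stated objective: simpler
-- what changed: A truncates the text after the report prefix by three sequential split-at-first-separator passes, one per separator; B makes a single left-to-right scan that accumulates characters, breaks at the first separator character, and then strips.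
import Mathlib
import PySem

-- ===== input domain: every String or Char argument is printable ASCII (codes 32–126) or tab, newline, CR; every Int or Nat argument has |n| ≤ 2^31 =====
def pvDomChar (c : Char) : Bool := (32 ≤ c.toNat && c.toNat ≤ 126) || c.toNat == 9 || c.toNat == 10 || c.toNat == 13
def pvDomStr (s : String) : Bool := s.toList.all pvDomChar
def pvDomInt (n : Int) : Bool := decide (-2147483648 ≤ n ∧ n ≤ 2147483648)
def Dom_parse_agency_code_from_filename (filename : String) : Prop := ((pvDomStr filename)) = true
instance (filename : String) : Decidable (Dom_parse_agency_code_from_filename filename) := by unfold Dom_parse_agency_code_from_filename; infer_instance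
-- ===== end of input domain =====

-- B replaces A's three sequential split-truncations by a single left-to-right scan that
-- stops at the first separator; objective: simpler (one pass, no repeated splitting).

-- ===== PORT A =====
-- literal transliteration of A; strings are handled on the List Char side via PySem.Chars
-- (PySem.Str.* are thin wrappers over these). The `[1]` / `[0]` indexings are PySem.List.pyGet?;
-- the guard ("Daily_Report_" in filename) ensures [1] exists, and [0] of a split always exists,
-- so `.getD []` is never used as a default.
def parse_agency_code_from_filename (filename : String) : String :=
  let fl := filename.toList
  if fl = [] ∨ PySem.Chars.isIn "Daily_Report_".toList fl = false then ""
  else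
    let after := (PySem.List.pyGet? (PySem.Chars.splitOnMax fl "Daily_Report_".toList 1) 1).getD []
    let after := ['_', ' ', '.'].foldl
      (fun a sep =>
        if PySem.Chars.isIn [sep] a then
          (PySem.List.pyGet? (PySem.Chars.splitOnMax a [sep] 1) 0).getD []
        else a) after
    String.ofList (PySem.Chars.strip after)

-- ===== PORT B =====
-- B's scan loop: append characters until the first '_', ' ' or '.' (break)
def pvScanB : List Char → List Char
  | [] => []
  | c :: rest => if c = '_' || c = ' ' || c = '.' then [] else c :: pvScanB rest

def parse_agency_code_from_filename_alt (filename : String) : String :=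
  let fl := filename.toList
  if fl = [] ∨ PySem.Chars.isIn "Daily_Report_".toList fl = false then ""
  else
    let after := (PySem.List.pyGet? (PySem.Chars.splitOnMax fl "Daily_Report_".toList 1) 1).getD []
    String.ofList (PySem.Chars.strip (pvScanB after))

-- ===== PRECONDITION & SPEC =====
def Spec_parse_agency_code_from_filename (filename : String) (out : String) : Prop := out = parse_agency_code_from_filename_alt filename
instance (filename : String) (out : String) : Decidable (Spec_parse_agency_code_from_filename filename out) := by unfold Spec_parse_agency_code_from_filename; infer_instance

-- ===== CLAIM (what is proved, stated in full; the proofs are below) =====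
def Claim_equal_parse_agency_code_from_filename : Prop := ∀ (filename : String), Dom_parse_agency_code_from_filename filename → Spec_parse_agency_code_from_filename filename (parse_agency_code_from_filename filename)

-- ===== LEMMAS AND PROOFS =====

-- splitOnMax.go with maxsplit exhausted returns the rest as one piece
theorem pv_go_zero (sep l cur : List Char) (acc : List (List Char)) (fuel : Nat) :
    PySem.Chars.splitOnMax.go sep fuel 0 l cur acc = ((cur.reverse ++ l) :: acc).reverse := by
  cases fuel <;> cases l <;> simp [PySem.Chars.splitOnMax.go]

-- characterisation of splitOnMax.go for a single-char separator and maxsplit 1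
theorem pv_go_single (c : Char) : ∀ (fuel : Nat) (l cur : List Char) (acc : List (List Char)),
    l.length < fuel →
    PySem.Chars.splitOnMax.go [c] fuel 1 l cur acc =
      acc.reverse ++ (cur.reverse ++ l.takeWhile (· ≠ c)) ::
        (if c ∈ l then [(l.dropWhile (· ≠ c)).tail] else []) := by
  intro fuel
  induction fuel with
  | zero => intro l cur acc h; omega
  | succ f ih =>
    intro l cur acc h
    cases l with
    | nil => simp [PySem.Chars.splitOnMax.go]
    | cons c' rest =>
      by_cases hc : c = c'
      · subst hc
        simp only [PySem.Chars.splitOnMax.go]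
        rw [if_neg (by omega : ¬ (1 : Nat) = 0), if_pos (by simp [List.isPrefixOf])]
        rw [pv_go_zero]
        simp
      · have hpre : [c].isPrefixOf (c' :: rest) = false := by
          simp [List.isPrefixOf]
          exact fun h => hc h
        simp only [PySem.Chars.splitOnMax.go]
        rw [if_neg (by omega : ¬ (1 : Nat) = 0), if_neg (by simp [hpre])]
        rw [ih rest (c' :: cur) acc (by simpa using Nat.lt_of_succ_lt_succ h)]
        have h1 : c' ≠ c := fun h => hc h.symm
        simp [h1, hc]

-- a single-char membership test through PySem.Chars.isIn
theorem pv_isIn_single (c : Char) (a : List Char) : PySem.Chars.isIn [c] a = true ↔ c ∈ a := by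
  rw [PySem.Chars.isIn_iff_infix]
  constructor
  · intro h; exact h.sublist.subset (List.mem_singleton_self c)
  · intro h; obtain ⟨s, t, rfl⟩ := List.append_of_mem h
    exact ⟨s, t, by simp⟩

-- A's truncation step is takeWhile up to the separator
theorem pv_trunc_eq (c : Char) (a : List Char) :
    (if PySem.Chars.isIn [c] a then
        (PySem.List.pyGet? (PySem.Chars.splitOnMax a [c] 1) 0).getD []
      else a) = a.takeWhile (· ≠ c) := by
  by_cases h : c ∈ a
  · rw [if_pos ((pv_isIn_single c a).2 h)]
    unfold PySem.Chars.splitOnMax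
    rw [if_neg (by omega : ¬ (1 : Int) < 0)]
    rw [show (1 : Int).toNat = 1 from rfl, pv_go_single c (a.length + 1) a [] [] (by omega)]
    simp [PySem.List.pyGet?, PySem.List.pyIdx?, h]
  · rw [if_neg (by simpa using fun hh => h ((pv_isIn_single c a).1 hh))]
    symm
    rw [List.takeWhile_eq_self_iff]
    intro x hx
    simp only [decide_eq_true_eq]
    exact fun he => h (he ▸ hx)

-- B's scan is takeWhile of the combined separator test
theorem pv_scan_eq (l : List Char) :
    pvScanB l = l.takeWhile (fun c => !(c = '_' || c = ' ' || c = '.')) := by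
  induction l with
  | nil => rfl
  | cons c rest ih =>
    simp only [pvScanB, List.takeWhile_cons]
    by_cases h1 : c = '_' <;> by_cases h2 : c = ' ' <;> by_cases h3 : c = '.' <;>
      simp [h1, h2, h3, ih]

-- the two post-processings of `after` agree
theorem pv_main (a : List Char) :
    (['_', ' ', '.'].foldl
      (fun a sep =>
        if PySem.Chars.isIn [sep] a then
          (PySem.List.pyGet? (PySem.Chars.splitOnMax a [sep] 1) 0).getD []
        else a) a) = pvScanB a := by
  simp only [List.foldl_cons, List.foldl_nil, pv_trunc_eq, pv_scan_eq,
    List.takeWhile_takeWhile]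
  congr 1
  funext x
  by_cases h1 : x = '_' <;> by_cases h2 : x = ' ' <;> by_cases h3 : x = '.' <;>
    simp [h1, h2, h3]

-- ===== VERDICT (by name: the statement is the Claim_ definition above) =====
theorem parse_agency_code_from_filename_spec : Claim_equal_parse_agency_code_from_filename := by
  intro filename _
  unfold Spec_parse_agency_code_from_filename parse_agency_code_from_filename
    parse_agency_code_from_filename_alt
  by_cases h : filename.toList = [] ∨ PySem.Chars.isIn "Daily_Report_".toList filename.toList = false
  · rw [if_pos h, if_pos h]
  · rw [if_neg h, if_neg h]
    simp only [pv_main]
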